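-- pv_equiv track=rewrite | github.com/Ivy8127/Leetcode-Practise | Arrays/competitiveGaming.py | numPlayers
-- ===== SOURCE A (Python) =====
-- def numPlayers(scores, k):
--     n = len(scores)
--     #sort scores in descending order
--     scores = sorted(scores, reverse=True)
--     #initialize a rank array to store the ranks
--     rank = []
--     #we start at rank 1
--     r =1
--     #this scores previous scores
--     prev = -1
--     for i in range(n):
--         if prev == -1:
--             rank.append(r)
--             prev = scores[i]
--         elif prev == scores[i]:
--             #same rank is added
--             rank.append(r)
--         else: #diff score values
--             prev = scores[i]
--             rank.append(i+1)
--             #update rank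
--             r = i +1
--     # rank [1,2,2,4]
--     #counts the number of people whose rank is less than k
--     count = 0
--     for i in range(n):
--         if rank[i] <= k and scores[i] != 0:
--             count +=1
--     return count
-- ===== SOURCE B (Python) =====
-- def numPlayers(scores, k):
--     counts = {}
--     for x in scores:
--         counts[x] = counts.get(x, 0) + 1
--     total = 0
--     seen = 0
--     for v in sorted(counts, reverse=True):
--         c = counts[v]
--         if seen + 1 <= k and v != 0:
--             total += c
--         seen += c
--     return total
-- ===== Notes on version B (the rewrite author's own statement) =====
-- stated objective: alternative
-- what changed: Replaces A's per-player rank array over the sorted list by a value->count dictionary scanned once over the distinct scores in descending order, deriving each group's competition rank from the running count of strictly greater players; this also removes A's prev=-1 sentinel.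
-- intended difference: On inputs where the k-th highest score is exactly -1 and some score lies below -1, A's prev=-1 sentinel re-fires and gives the group just below -1 the rank of -1, so A also counts those players although their competition rank exceeds k; B returns the intended smaller count (e.g. scores=[-1,-2], k=1: A=2, B=1). — e.g. on numPlayers([-1, -2], 1): A returns 2, B returns 1
import Mathlib
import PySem

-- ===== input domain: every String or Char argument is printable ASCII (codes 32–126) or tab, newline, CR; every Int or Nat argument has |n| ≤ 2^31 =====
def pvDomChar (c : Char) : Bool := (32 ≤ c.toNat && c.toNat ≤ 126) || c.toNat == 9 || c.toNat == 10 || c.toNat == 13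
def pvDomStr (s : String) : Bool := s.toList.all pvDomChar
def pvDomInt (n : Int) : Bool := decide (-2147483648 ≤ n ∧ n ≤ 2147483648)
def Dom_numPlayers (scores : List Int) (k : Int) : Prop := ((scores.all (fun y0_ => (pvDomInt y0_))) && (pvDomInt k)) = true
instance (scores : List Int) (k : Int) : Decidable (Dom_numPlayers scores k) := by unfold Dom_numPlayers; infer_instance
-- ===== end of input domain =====

-- B replaces A's per-player rank array over the sorted list by a value->count dictionary scanned
-- once over the distinct scores in descending order; A's prev=-1 sentinel artefact is stated as D_.


-- ===== PORT A =====
def numPlayers (scores : List Int) (k : Int) : Int :=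
  let n : Int := PySem.List.len scores
  let s := PySem.List.sorted scores (fun x => x) true
  let st := (PySem.List.pyRange 0 n 1).foldl
    (fun (st : List Int × Int × Int) i =>
      if st.2.2 = -1 then
        (st.1 ++ [st.2.1], st.2.1, PySem.List.pyGetD s i 0)
      else if st.2.2 = PySem.List.pyGetD s i 0 then
        (st.1 ++ [st.2.1], st.2.1, st.2.2)
      else
        (st.1 ++ [i + 1], i + 1, PySem.List.pyGetD s i 0))
    ([], 1, -1)
  (PySem.List.pyRange 0 n 1).foldl
    (fun count i =>
      if PySem.List.pyGetD st.1 i 0 ≤ k ∧ PySem.List.pyGetD s i 0 ≠ 0 then count + 1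
      else count) 0

-- ===== PORT B =====
def numPlayers_alt (scores : List Int) (k : Int) : Int :=
  let counts := scores.foldl (fun d x => d.insert x (d.getD x 0 + 1)) (PySem.Dict.empty : PySem.Dict Int Int)
  let vs := PySem.List.sorted counts.keys (fun v => v) true
  (vs.foldl
    (fun (st : Int × Int) v =>
      (if st.2 + 1 ≤ k ∧ v ≠ 0 then st.1 + counts.getD v 0 else st.1, st.2 + counts.getD v 0))
    (0, 0)).1

-- ===== PRECONDITION & SPEC =====
-- On inputs containing -1 together with a score below -1, with k between the rank of -1 and the
-- true rank of the next lower group, A's prev=-1 sentinel re-fires and gives that group -1's rank,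
-- so A counts its players although their competition rank exceeds k; B returns the intended count.
def D_numPlayers (scores : List Int) (k : Int) : Prop :=
  1 ≤ k ∧ (∃ x ∈ scores, x < -1) ∧
  PySem.List.pyGet? (PySem.List.sorted scores (fun x => x) true) (k - 1) = some (-1)
instance (scores : List Int) (k : Int) : Decidable (D_numPlayers scores k) := by
  unfold D_numPlayers; infer_instance

def Spec_numPlayers (scores : List Int) (k : Int) (out : Int) : Prop :=
  ¬ D_numPlayers scores k → out = numPlayers_alt scores k
instance (scores : List Int) (k : Int) (out : Int) : Decidable (Spec_numPlayers scores k out) := by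
  unfold Spec_numPlayers; infer_instance

def pvDiffWitness_numPlayers : List Int × Int := ([-1, -2], 1)
def pvDiffWitnessOut_numPlayers : Int × Int := (2, 1)

-- ===== CLAIM (what is proved, stated in full; the proofs are below) =====
def Claim_unchanged_numPlayers : Prop := ∀ (scores : List Int) (k : Int), Dom_numPlayers scores k → Spec_numPlayers scores k (numPlayers scores k)
def Claim_exact_numPlayers : Prop := ∀ (scores : List Int) (k : Int), Dom_numPlayers scores k → D_numPlayers scores k → numPlayers scores k ≠ numPlayers_alt scores k
def Claim_changed_numPlayers : Prop := Dom_numPlayers (pvDiffWitness_numPlayers.1) (pvDiffWitness_numPlayers.2) ∧ D_numPlayers (pvDiffWitness_numPlayers.1) (pvDiffWitness_numPlayers.2) ∧ numPlayers (pvDiffWitness_numPlayers.1) (pvDiffWitness_numPlayers.2) = pvDiffWitnessOut_numPlayers.1 ∧ numPlayers_alt (pvDiffWitness_numPlayers.1) (pvDiffWitness_numPlayers.2) = pvDiffWitnessOut_numPlayers.2 ∧ pvDiffWitnessOut_numPlayers.1 ≠ pvDiffWitnessOut_numPlayers.2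

-- ===== LEMMAS AND PROOFS =====

-- competition rank of value x in s: 1 + number of strictly greater entries
def rkI (s : List Int) (x : Int) : Int := (s.countP (fun y => decide (x < y)) : Int) + 1
-- the per-player counting predicate both programs compute (outside D_)
def Pk (s : List Int) (k : Int) (x : Int) : Bool := decide (rkI s x ≤ k ∧ x ≠ 0)
def mN (s : List Int) : Nat := s.countP (fun y => decide ((-1 : Int) < y))
def cN (s : List Int) : Nat := s.count (-1)
-- D_numPlayers, phrased over any permutation s of the input
def Wnd (s : List Int) (k : Int) : Prop :=
  (-1 : Int) ∈ s ∧ (∃ y ∈ s, y < -1) ∧ (mN s : Int) + 1 ≤ k ∧ k ≤ (mN s : Int) + (cN s : Int)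

-- in a descending list, positions between the -1-strict and -1-weak counts hold exactly -1
lemma sorted_getElem_m1 (s : List Int) (hpw : s.Pairwise (fun a b => b ≤ a)) :
    ∀ (i : Nat) (hi : i < s.length),
    s.countP (fun y => decide ((-1 : Int) < y)) ≤ i →
    i < s.countP (fun y => decide ((-1 : Int) ≤ y)) →
    s[i] = -1 := by
  induction s with
  | nil => intro i hi _ _; simp at hi
  | cons x t ih =>
    intro i hi hm hc
    have hble : ∀ b ∈ t, b ≤ x := (List.pairwise_cons.mp hpw).1
    have hpw' := (List.pairwise_cons.mp hpw).2
    cases i with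
    | zero =>
      simp only [List.countP_cons] at hm hc
      have hx1 : ¬ ((-1 : Int) < x) := by
        intro h; simp [h] at hm
      have hx2 : (-1 : Int) ≤ x := by
        by_contra h
        have : t.countP (fun y => decide ((-1 : Int) ≤ y)) = 0 :=
          List.countP_eq_zero.mpr (fun b hb => by
            simpa using not_le.mpr (lt_of_le_of_lt (hble b hb) (not_le.mp h)))
        simp [this, h] at hc
      simpa using by omega
    | succ i =>
      simp only [List.countP_cons] at hm hc
      have hmt : t.countP (fun y => decide ((-1 : Int) < y)) ≤ i := by
        by_cases hx : (-1 : Int) < x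
        · simp [hx] at hm; omega
        · have : t.countP (fun y => decide ((-1 : Int) < y)) = 0 :=
            List.countP_eq_zero.mpr (fun b hb => by
              simpa using not_lt.mpr (le_trans (hble b hb) (not_lt.mp hx)))
          omega
      have hct : i < t.countP (fun y => decide ((-1 : Int) ≤ y)) := by
        split_ifs at hc <;> omega
      have hit : i < t.length := by simpa using hi
      simpa using ih hpw' i hit hmt hct

-- A's rank list, as the structural recursion the first loop performs
def ranksA : List Int → Int → Int → Int → List Int
  | [], _, _, _ => []
  | x :: t, i, r, prev =>
    if prev = -1 then r :: ranksA t (i + 1) r x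
    else if prev = x then r :: ranksA t (i + 1) r prev
    else (i + 1) :: ranksA t (i + 1) (i + 1) x

lemma length_ranksA (t : List Int) : ∀ i r prev, (ranksA t i r prev).length = t.length := by
  induction t with
  | nil => intro i r prev; rfl
  | cons x t ih =>
    intro i r prev
    simp only [ranksA]
    split_ifs <;> simp [ih]

-- member-wise disjoint split of countP
lemma countP_split (l : List Int) (p q w : Int → Bool)
    (h : ∀ x ∈ l, p x = (q x || w x) ∧ ¬(q x = true ∧ w x = true)) :
    l.countP p = l.countP q + l.countP w := by
  induction l with
  | nil => simp
  | cons a l ih =>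
    have ha := h a (by simp)
    have ht : ∀ x ∈ l, p x = (q x || w x) ∧ ¬(q x = true ∧ w x = true) :=
      fun x hx => h x (by simp [hx])
    simp only [List.countP_cons, ih ht]
    rcases ha with ⟨h1, h2⟩
    cases hq : q a <;> cases hw : w a <;> simp [hq, hw] at h1 h2 ⊢ <;> simp [h1] <;> omega

-- rank of a fresh value: everything before it is strictly greater, everything from it on is ≤ it
lemma rk_fresh (s p t' : List Int) (x : Int) (hsp : s = p ++ x :: t')
    (hgt : ∀ a ∈ p, x < a) (hball : ∀ b ∈ t', b ≤ x) :
    rkI s x = (p.length : Int) + 1 := by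
  unfold rkI
  rw [hsp, List.countP_append]
  rw [List.countP_eq_length.mpr (fun a ha => decide_eq_true (hgt a ha))]
  rw [List.countP_eq_zero.mpr (fun b hb => by
    rcases List.mem_cons.mp hb with rfl | hbm
    · simp
    · simpa using not_lt.mpr (hball b hbm))]
  push_cast; ring

-- players with score ≥ -1 are those with score > -1 plus those tied at -1
lemma countP_ge_split (s : List Int) :
    s.countP (fun y => decide ((-1 : Int) ≤ y)) = mN s + cN s := by
  have hsplit : s.countP (fun y => decide ((-1 : Int) ≤ y))
      = mN s + s.countP (fun y => y == (-1 : Int)) := by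
    refine countP_split _ _ _ _ (fun y _ => ?_)
    constructor
    · by_cases h : y = -1
      · subst h; simp
      · by_cases h2 : (-1 : Int) < y
        · simp [h2, le_of_lt h2]
        · simp [h2, h, show ¬(-1 : Int) ≤ y by omega]
    · rintro ⟨h1, h2⟩
      simp at h1 h2
      omega
  rw [hsplit]
  unfold cN
  rw [List.count_eq_countP]

-- indicator of the window in which the sentinel bug changes A's count
def wI (s : List Int) (k : Int) : Int :=
  if (mN s : Int) + 1 ≤ k ∧ k ≤ (mN s : Int) + (cN s : Int) then 1 else 0
-- size of the first group of scores strictly below -1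
def fbI (t : List Int) : Int :=
  match t.filter (fun x => decide (x < -1)) with
  | [] => 0
  | w :: _ => (t.count w : Int)
-- the pending correction A's state still owes, per loop state
def exI (s : List Int) (k : Int) (t : List Int) (r prev : Int) : Int :=
  if prev < -1 then (if r = (mN s : Int) + 1 then wI s k * (t.count prev : Int) else 0)
  else wI s k * fbI t

lemma wI_zero_of_cN (s : List Int) (k : Int) (h : cN s = 0) : wI s k = 0 := by
  unfold wI
  rw [if_neg (by push_cast [h]; omega)]

lemma wI_zero_of_not_mem (s : List Int) (k : Int) (h : (-1 : Int) ∉ s) : wI s k = 0 :=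
  wI_zero_of_cN s k (List.count_eq_zero.mpr h)

lemma rk_ge_of_lt (s : List Int) (prev : Int) (h : prev < -1) :
    (mN s : Int) + (cN s : Int) + 1 ≤ rkI s prev := by
  have hmono : s.countP (fun y => decide ((-1 : Int) ≤ y)) ≤ s.countP (fun y => decide (prev < y)) :=
    List.countP_mono_left (fun y _ hy => by simp at hy ⊢; omega)
  have h2 := countP_ge_split s
  unfold rkI
  omega

lemma exI_zero_HA (s : List Int) (k : Int) (t : List Int) (r prev : Int)
    (hlt : prev < -1) (hr : r = rkI s prev) : exI s k t r prev = 0 := by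
  unfold exI
  rw [if_pos hlt]
  by_cases h : r = (mN s : Int) + 1
  · rw [if_pos h]
    have h1 := rk_ge_of_lt s prev hlt
    have hc : cN s = 0 := by omega
    rw [wI_zero_of_cN s k hc]
    ring
  · rw [if_neg h]

lemma fbI_cons_ge (x : Int) (t : List Int) (h : ¬ x < -1) : fbI (x :: t) = fbI t := by
  unfold fbI
  rw [List.filter_cons_of_neg (by simpa using h)]
  cases hf : t.filter (fun y => decide (y < -1)) with
  | nil => rfl
  | cons w l =>
    have hw : w < -1 := by
      have : w ∈ t.filter (fun y => decide (y < -1)) := by rw [hf]; simp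
      simpa using (List.mem_filter.mp this).2
    have hxw : ¬ (x = w) := by omega
    simp [hxw]

lemma fbI_cons_lt (x : Int) (t : List Int) (h : x < -1) : fbI (x :: t) = (t.count x : Int) + 1 := by
  unfold fbI
  rw [List.filter_cons_of_pos (by simpa using h)]
  simp

-- when prev = -1 closes p and everything after is < -1, p holds exactly the players ranked before
lemma len_p_eq (s p t' : List Int) (x : Int) (hsp : s = p ++ x :: t')
    (hge : ∀ a ∈ p, (-1 : Int) ≤ a) (hxlt : x < -1) (hball : ∀ b ∈ t', b ≤ x) :
    (p.length : Int) = (mN s : Int) + (cN s : Int) := by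
  have key : s.countP (fun y => decide ((-1 : Int) ≤ y)) = p.length := by
    rw [hsp, List.countP_append]
    rw [List.countP_eq_length.mpr (fun a ha => decide_eq_true (hge a ha))]
    rw [List.countP_eq_zero.mpr (fun b hb => by
      rcases List.mem_cons.mp hb with rfl | hbm
      · simpa using not_le.mpr hxlt
      · simpa using not_le.mpr (lt_of_le_of_lt (hball b hbm) hxlt))]
    simp
  rw [← key, countP_ge_split s]
  push_cast; ring

-- the heart of the A-side proof: A's second loop over the rank list counts exactly the players
-- whose competition rank is ≤ k and whose score is nonzero, plus the pending sentinel correction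
lemma A_main (s : List Int) (k : Int) :
    ∀ (t : List Int), ∀ (p : List Int) (r prev c0 : Int),
    s = p ++ t → prev ∈ p → (∀ a ∈ p, prev ≤ a) → (∀ b ∈ t, b ≤ prev) →
    t.Pairwise (fun a b => b ≤ a) →
    (r = rkI s prev ∨
      (prev < -1 ∧ r = (mN s : Int) + 1 ∧ rkI s prev = (mN s : Int) + (cN s : Int) + 1 ∧ (-1 : Int) ∈ p)) →
    ((ranksA t (p.length : Int) r prev).zip t).foldl
        (fun c q => if q.1 ≤ k ∧ q.2 ≠ 0 then c + 1 else c) c0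
      = c0 + (t.countP (Pk s k) : Int) + exI s k t r prev := by
  intro t
  induction t with
  | nil =>
    intro p r prev c0 _ _ _ _ _ _
    have : exI s k [] r prev = 0 := by
      unfold exI fbI
      split_ifs <;> simp
    simp [ranksA, this]
  | cons x t' ih =>
    intro p r prev c0 hsp hpm hpa hb hpw hdisj
    have hxle : x ≤ prev := hb x (by simp)
    have hball : ∀ b ∈ t', b ≤ x := fun b hb' => (List.pairwise_cons.mp hpw).1 b hb'
    have hpw' : t'.Pairwise (fun a b => b ≤ a) := (List.pairwise_cons.mp hpw).2
    have hsp' : s = (p ++ [x]) ++ t' := by simp [hsp]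
    have hlen : ((p ++ [x]).length : Int) = (p.length : Int) + 1 := by simp
    by_cases h1 : prev = -1
    · -- python: prev == -1 branch
      have hr : r = rkI s prev := by
        rcases hdisj with h | h
        · exact h
        · exfalso; omega
      have hrm : r = (mN s : Int) + 1 := by
        rw [hr, h1]; rfl
      have hex_old : exI s k (x :: t') r prev = wI s k * fbI (x :: t') := by
        unfold exI; rw [if_neg (by omega)]
      simp only [ranksA, if_pos h1, List.zip_cons_cons, List.foldl_cons]
      rw [show ((p.length : Int) + 1) = (((p ++ [x]).length : Int)) from hlen.symm]
      by_cases h2 : x = -1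
      · -- the tied -1 group continues: the appended rank is correct
        rw [ih (p ++ [x]) r x _ hsp' (by simp) (fun a ha => by
              rcases List.mem_append.mp ha with ha' | ha'
              · exact le_trans hxle (hpa a ha')
              · simp at ha'; omega)
            hball hpw'
            (Or.inl (by rw [hr, h1, h2]))]
        have hex_new : exI s k t' r x = wI s k * fbI t' := by
          unfold exI; rw [if_neg (by omega)]
        have hfb : fbI (x :: t') = fbI t' := fbI_cons_ge x t' (by omega)
        have hcond : (r ≤ k ∧ x ≠ 0) ↔ (rkI s x ≤ k ∧ x ≠ 0) := by rw [hr, h1, h2]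
        have hctr : (if r ≤ k ∧ x ≠ 0 then c0 + 1 else c0)
            = c0 + (if Pk s k x = true then 1 else 0) := by
          by_cases hc : rkI s x ≤ k ∧ x ≠ 0
          · rw [if_pos (hcond.mpr hc)]; simp [Pk, hc]
          · rw [if_neg (fun hcc => hc (hcond.mp hcc))]; simp [Pk, hc]
        rw [hctr, hex_new, hex_old, hfb, List.countP_cons]
        push_cast
        ring
      · -- the sentinel re-fires: x < -1 gets -1's rank; the window indicator pays the difference
        have hxlt : x < -1 := by omega
        have hrkx : rkI s x = (p.length : Int) + 1 :=
          rk_fresh s p t' x hsp (fun a ha => lt_of_lt_of_le (h1 ▸ hxlt) (hpa a ha)) hball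
        have hplen : (p.length : Int) = (mN s : Int) + (cN s : Int) :=
          len_p_eq s p t' x hsp (fun a ha => h1 ▸ hpa a ha) hxlt hball
        have hrkm : rkI s x = (mN s : Int) + (cN s : Int) + 1 := by rw [hrkx, hplen]
        rw [ih (p ++ [x]) r x _ hsp' (by simp) (fun a ha => by
              rcases List.mem_append.mp ha with ha' | ha'
              · exact le_trans hxle (hpa a ha')
              · simp at ha'; omega)
            hball hpw'
            (Or.inr ⟨hxlt, hrm, hrkm, by rw [← h1]; exact List.mem_append_left _ hpm⟩)]
        have hex_new : exI s k t' r x = wI s k * (t'.count x : Int) := by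
          unfold exI; rw [if_pos hxlt, if_pos hrm]
        have hx0 : x ≠ 0 := by omega
        have hPkx : (Pk s k x = true) ↔ ((mN s : Int) + (cN s : Int) + 1 ≤ k ∧ x ≠ 0) := by
          simp [Pk, hrkm]
        have hctr : (if r ≤ k ∧ x ≠ 0 then c0 + 1 else c0)
            = c0 + (if Pk s k x = true then 1 else 0) + wI s k := by
          simp only [hPkx]
          rw [hrm]
          unfold wI
          split_ifs <;> omega
        rw [hctr, hex_new, hex_old, fbI_cons_lt x t' hxlt, List.countP_cons]
        push_cast
        ring
    · by_cases h2 : prev = x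
      · -- python: tied with prev
        simp only [ranksA, if_neg h1, if_pos h2, List.zip_cons_cons, List.foldl_cons]
        rw [show ((p.length : Int) + 1) = (((p ++ [x]).length : Int)) from hlen.symm]
        rw [ih (p ++ [x]) r prev _ hsp' (List.mem_append_left _ hpm)
            (fun a ha => by
              rcases List.mem_append.mp ha with ha' | ha'
              · exact hpa a ha'
              · simp at ha'; omega)
            (fun b hb' => h2 ▸ hball b hb') hpw'
            (by
              rcases hdisj with h | h
              · exact Or.inl h
              · exact Or.inr ⟨h.1, h.2.1, h.2.2.1, List.mem_append_left _ h.2.2.2⟩)]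
        rcases hdisj with hA | hB
        · -- clean state: rank r is the true rank of x
          have hcond : (r ≤ k ∧ x ≠ 0) ↔ (rkI s x ≤ k ∧ x ≠ 0) := by rw [hA, h2]
          have hctr : (if r ≤ k ∧ x ≠ 0 then c0 + 1 else c0)
              = c0 + (if Pk s k x = true then 1 else 0) := by
            by_cases hc : rkI s x ≤ k ∧ x ≠ 0
            · rw [if_pos (hcond.mpr hc)]; simp [Pk, hc]
            · rw [if_neg (fun hcc => hc (hcond.mp hcc))]; simp [Pk, hc]
          by_cases hplt : prev < -1
          · rw [exI_zero_HA s k (x :: t') r prev hplt hA, exI_zero_HA s k t' r prev hplt hA,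
              hctr, List.countP_cons]
            push_cast; ring
          · have hex_old : exI s k (x :: t') r prev = wI s k * fbI (x :: t') := by
              unfold exI; rw [if_neg hplt]
            have hex_new : exI s k t' r prev = wI s k * fbI t' := by
              unfold exI; rw [if_neg hplt]
            have hfb : fbI (x :: t') = fbI t' := fbI_cons_ge x t' (by omega)
            rw [hex_old, hex_new, hfb, hctr, List.countP_cons]
            push_cast; ring
        · -- sentinel state: the tied group below -1 keeps -1's rank
          rcases hB with ⟨hlt, hrm, hrk, _⟩
          have hx0 : x ≠ 0 := by omega
          have hrkm : rkI s x = (mN s : Int) + (cN s : Int) + 1 := by rw [← h2, hrk]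
          have hPkx : (Pk s k x = true) ↔ ((mN s : Int) + (cN s : Int) + 1 ≤ k ∧ x ≠ 0) := by
            simp [Pk, hrkm]
          have hctr : (if r ≤ k ∧ x ≠ 0 then c0 + 1 else c0)
              = c0 + (if Pk s k x = true then 1 else 0) + wI s k := by
            simp only [hPkx]
            rw [hrm]
            unfold wI
            split_ifs <;> omega
          have hex_old : exI s k (x :: t') r prev = wI s k * ((t'.count prev : Int) + 1) := by
            unfold exI
            rw [if_pos hlt, if_pos hrm, h2, List.count_cons_self]
            push_cast; ring
          have hex_new : exI s k t' r prev = wI s k * (t'.count prev : Int) := by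
            unfold exI; rw [if_pos hlt, if_pos hrm]
          rw [hctr, hex_old, hex_new, List.countP_cons]
          push_cast; ring
      · -- python: a strictly smaller fresh value, rank i+1
        have hxlt : x < prev := lt_of_le_of_ne hxle (fun he => h2 he.symm)
        have hrkx : rkI s x = (p.length : Int) + 1 :=
          rk_fresh s p t' x hsp (fun a ha => lt_of_lt_of_le hxlt (hpa a ha)) hball
        simp only [ranksA, if_neg h1, if_neg h2, List.zip_cons_cons, List.foldl_cons]
        rw [show ((p.length : Int) + 1) = (((p ++ [x]).length : Int)) from hlen.symm]
        rw [ih (p ++ [x]) (((p ++ [x]).length : Int)) x _ hsp' (by simp)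
            (fun a ha => by
              rcases List.mem_append.mp ha with ha' | ha'
              · exact le_trans (le_of_lt hxlt) (hpa a ha')
              · simp at ha'; omega)
            hball hpw'
            (Or.inl (by rw [hrkx, hlen]))]
        have hctr : (if ((p ++ [x]).length : Int) ≤ k ∧ x ≠ 0 then c0 + 1 else c0)
            = c0 + (if Pk s k x = true then 1 else 0) := by
          rw [hlen]
          by_cases hc : rkI s x ≤ k ∧ x ≠ 0
          · rw [if_pos (by rw [← hrkx]; exact hc)]; simp [Pk, hc]
          · rw [if_neg (fun hcc => hc (by rw [hrkx]; exact hcc))]; simp [Pk, hc]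
        have hr' : ((p ++ [x]).length : Int) = rkI s x := by rw [hrkx, hlen]
        by_cases hplt : prev < -1
        · -- past the -1 block: no pending correction on either side
          have hx1 : x < -1 := by omega
          have hex_old : exI s k (x :: t') r prev = 0 := by
            rcases hdisj with hA | hB
            · exact exI_zero_HA s k (x :: t') r prev hplt hA
            · rcases hB with ⟨hlt, hrm, _, _⟩
              unfold exI
              rw [if_pos hlt, if_pos hrm,
                List.count_eq_zero.mpr (by
                  intro hmem
                  rcases List.mem_cons.mp hmem with he | hm
                  · omega
                  · have := hball prev hm; omega)]
              ring
          have hex_new : exI s k t' (((p ++ [x]).length : Int)) x = 0 :=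
            exI_zero_HA s k t' _ x hx1 hr'
          rw [hctr, hex_old, hex_new, List.countP_cons]
          push_cast; ring
        · -- prev > -1: the -1 block (if any) is still ahead
          have hA : r = rkI s prev := by
            rcases hdisj with h | h
            · exact h
            · exfalso; omega
          have hex_old : exI s k (x :: t') r prev = wI s k * fbI (x :: t') := by
            unfold exI; rw [if_neg hplt]
          by_cases hx1 : x < -1
          · -- no -1 at all in s: the window is empty
            have hnm : (-1 : Int) ∉ s := by
              rw [hsp]
              intro hmem
              rcases List.mem_append.mp hmem with hmp | hmt
              · have := hpa _ hmp; omega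
              · rcases List.mem_cons.mp hmt with he | hm
                · omega
                · have := hball _ hm; omega
            have hw0 := wI_zero_of_not_mem s k hnm
            have hex_new : exI s k t' (((p ++ [x]).length : Int)) x = 0 :=
              exI_zero_HA s k t' _ x hx1 hr'
            rw [hctr, hex_old, hex_new, hw0, List.countP_cons]
            push_cast; ring
          · have hex_new : exI s k t' (((p ++ [x]).length : Int)) x = wI s k * fbI t' := by
              unfold exI; rw [if_neg hx1]
            have hfb : fbI (x :: t') = fbI t' := fbI_cons_ge x t' hx1
            rw [hctr, hex_old, hex_new, hfb, List.countP_cons]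
            push_cast; ring

-- A's first loop, rephrased over enumerate, computes ranksA
lemma fold_enum_ranks : ∀ (t : List Int) (i : Int) (acc : List Int) (r prev : Int),
    ((PySem.List.enumerate t i).foldl
      (fun (st : List Int × Int × Int) (q : Int × Int) =>
        if st.2.2 = -1 then (st.1 ++ [st.2.1], st.2.1, q.2)
        else if st.2.2 = q.2 then (st.1 ++ [st.2.1], st.2.1, st.2.2)
        else (st.1 ++ [q.1 + 1], q.1 + 1, q.2)) (acc, r, prev)).1
    = acc ++ ranksA t i r prev := by
  intro t
  induction t with
  | nil => intro i acc r prev; simp [PySem.List.enumerate_nil, ranksA]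
  | cons x t ih =>
    intro i acc r prev
    rw [PySem.List.enumerate_cons]
    simp only [List.foldl_cons]
    by_cases h1 : prev = -1
    · simp only [if_pos h1, ranksA, ih]
      simp
    · by_cases h2 : prev = x
      · simp only [if_neg h1, if_pos h2, ranksA, ih]
        simp [h2]
      · simp only [ranksA, if_neg h1, if_neg h2, ih]
        simp

-- an index loop over two same-length lists is a fold over their zip
lemma foldl_range_zip (xs : List Int) : ∀ (ys : List Int), ys.length = xs.length →
    ∀ (g : Int → Int → Int → Int) (c0 : Int),
    (List.range xs.length).foldl (fun c j => g c (ys.getD j 0) (xs.getD j 0)) c0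
      = (ys.zip xs).foldl (fun c q => g c q.1 q.2) c0 := by
  induction xs with
  | nil => intro ys h g c0; rw [List.length_eq_zero_iff.mp h]; simp
  | cons x xs ih =>
    intro ys h g c0
    cases ys with
    | nil => simp at h
    | cons y ys =>
      simp only [List.length_cons] at h
      rw [show (x :: xs).length = xs.length + 1 from rfl, List.range_succ_eq_map]
      simp only [List.foldl_cons, List.foldl_map, List.getD_cons_zero, List.getD_cons_succ,
        List.zip_cons_cons]
      exact ih ys (by omega) g (g c0 y x)

-- port A, rewritten as the zip fold over its rank list and the sorted scores
lemma port_loops (scores : List Int) (k : Int) :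
    numPlayers scores k
      = (((ranksA (PySem.List.sorted scores (fun x => x) true) 0 1 (-1)).zip
            (PySem.List.sorted scores (fun x => x) true)).foldl
          (fun c q => if q.1 ≤ k ∧ q.2 ≠ 0 then c + 1 else c) 0) := by
  simp only [numPlayers]
  set s := PySem.List.sorted scores (fun x => x) true with hs
  have hlen_s : s.length = scores.length := PySem.List.length_sorted scores (fun x => x) true
  have hn : PySem.List.len scores = PySem.List.len s := by
    simp [PySem.List.len_eq, hlen_s]
  rw [hn]
  have h1 : ((PySem.List.pyRange 0 (PySem.List.len s) 1).foldl
      (fun (st : List Int × Int × Int) i =>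
        if st.2.2 = -1 then (st.1 ++ [st.2.1], st.2.1, PySem.List.pyGetD s i 0)
        else if st.2.2 = PySem.List.pyGetD s i 0 then (st.1 ++ [st.2.1], st.2.1, st.2.2)
        else (st.1 ++ [i + 1], i + 1, PySem.List.pyGetD s i 0)) ([], 1, -1))
      = ((PySem.List.enumerate s 0).foldl
      (fun (st : List Int × Int × Int) (q : Int × Int) =>
        if st.2.2 = -1 then (st.1 ++ [st.2.1], st.2.1, q.2)
        else if st.2.2 = q.2 then (st.1 ++ [st.2.1], st.2.1, st.2.2)
        else (st.1 ++ [q.1 + 1], q.1 + 1, q.2)) ([], 1, -1)) := by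
    rw [PySem.List.enumerate_eq_map_pyRange s 0, List.foldl_map]
  rw [h1, fold_enum_ranks s 0 [] 1 (-1), List.nil_append]
  rw [PySem.List.len_eq, PySem.List.pyRange_zero_natCast s.length, List.foldl_map]
  simp only [PySem.List.pyGetD_natCast]
  exact foldl_range_zip s (ranksA s 0 1 (-1)) (length_ranksA s 0 1 (-1))
    (fun c a b => if a ≤ k ∧ b ≠ 0 then c + 1 else c) 0

-- in a descending list, s[i] = -1 pins i between the -1-strict and -1-weak counts
lemma sorted_getElem_m1_inv (s : List Int) (hpw : s.Pairwise (fun a b => b ≤ a)) :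
    ∀ (i : Nat) (hi : i < s.length), s[i] = -1 →
    s.countP (fun y => decide ((-1 : Int) < y)) ≤ i ∧
    i < s.countP (fun y => decide ((-1 : Int) ≤ y)) := by
  induction s with
  | nil => intro i hi _; simp at hi
  | cons x t ih =>
    intro i hi hv
    have hble : ∀ b ∈ t, b ≤ x := (List.pairwise_cons.mp hpw).1
    have hpw' := (List.pairwise_cons.mp hpw).2
    cases i with
    | zero =>
      simp at hv
      subst hv
      have ht : t.countP (fun y => decide ((-1 : Int) < y)) = 0 :=
        List.countP_eq_zero.mpr (fun b hb => by
          simpa using not_lt.mpr (hble b hb))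
      simp [ht]
    | succ i =>
      have hit : i < t.length := by simpa using hi
      have hv' : t[i] = -1 := by simpa using hv
      have hih := ih hpw' i hit hv'
      have hxge : (-1 : Int) ≤ x := by
        have : t[i] ∈ t := List.getElem_mem hit
        have := hble _ this
        omega
      simp only [List.countP_cons]
      split_ifs <;> simp at * <;> omega

-- A returns the agreed count plus the window correction on the first group below -1
lemma A_exact (scores : List Int) (k : Int) :
    numPlayers scores k
      = ((PySem.List.sorted scores (fun x => x) true).countP
          (Pk (PySem.List.sorted scores (fun x => x) true) k) : Int)
        + wI (PySem.List.sorted scores (fun x => x) true) k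
          * fbI (PySem.List.sorted scores (fun x => x) true) := by
  rw [port_loops]
  set s := PySem.List.sorted scores (fun x => x) true with hs
  have hpws : s.Pairwise (fun a b => b ≤ a) := by
    have := PySem.List.sorted_pairwise_rev scores (fun x => x)
    simpa [← hs] using this
  cases hnil : s with
  | nil => simp [ranksA, fbI]
  | cons x t =>
    rw [hnil] at hpws
    have hball : ∀ b ∈ t, b ≤ x := (List.pairwise_cons.mp hpws).1
    have hrk1 : rkI s x = 1 := by
      unfold rkI
      rw [List.countP_eq_zero.mpr (fun y hy => by
        rw [hnil] at hy
        rcases List.mem_cons.mp hy with rfl | hm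
        · simp
        · simpa using not_lt.mpr (hball y hm))]
      simp
    rw [show ranksA (x :: t) 0 1 (-1) = 1 :: ranksA t (0 + 1) 1 x from by simp [ranksA]]
    simp only [List.zip_cons_cons, List.foldl_cons]
    set c0v := (if (1 : Int) ≤ k ∧ x ≠ 0 then (0 : Int) + 1 else (0 : Int)) with hc0
    rw [show ((0 : Int) + 1) = ((([x] : List Int).length : Int)) from by simp]
    rw [A_main s k t [x] 1 x c0v (by simpa using hnil) (by simp) (by simp)
        hball (List.pairwise_cons.mp hpws).2 (Or.inl hrk1.symm)]
    rw [hnil, List.countP_cons]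
    have hrk1' : rkI (x :: t) x = 1 := hnil ▸ hrk1
    have hcond : ((1 : Int) ≤ k ∧ x ≠ 0) ↔ (rkI (x :: t) x ≤ k ∧ x ≠ 0) := by rw [hrk1']
    have hexv : exI (x :: t) k t 1 x = wI (x :: t) k * fbI (x :: t) := by
      by_cases hx1 : x < -1
      · have hnm : (-1 : Int) ∉ (x :: t) := by
          intro hm
          rcases List.mem_cons.mp hm with he | hm2
          · omega
          · have := hball _ hm2; omega
        unfold exI
        rw [if_pos hx1, wI_zero_of_not_mem _ k hnm]
        by_cases h1m : (1 : Int) = (mN (x :: t) : Int) + 1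
        · rw [if_pos h1m]; ring
        · rw [if_neg h1m]; ring
      · unfold exI
        rw [if_neg hx1, fbI_cons_ge x t hx1]
    rw [hexv, hc0]
    by_cases hc : rkI (x :: t) x ≤ k ∧ x ≠ 0
    · rw [if_pos (hcond.mpr hc)]
      have hp : Pk (x :: t) k x = true := by simp [Pk, hc]
      rw [hp]
      push_cast
      rw [if_pos rfl]
      ring
    · rw [if_neg (fun hcc => hc (hcond.mp hcc))]
      have hp : Pk (x :: t) k x = false := by simp [Pk, hc]
      rw [hp]
      push_cast
      ring

-- the first group below -1 is nonempty as soon as one score lies below -1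
lemma fbI_pos (s : List Int) (y : Int) (hy : y ∈ s) (hl : y < -1) : 1 ≤ fbI s := by
  unfold fbI
  cases hf : s.filter (fun x => decide (x < -1)) with
  | nil =>
    exfalso
    have : y ∈ s.filter (fun x => decide (x < -1)) := List.mem_filter.mpr ⟨hy, by simpa⟩
    rw [hf] at this
    simp at this
  | cons w l =>
    have hwmem : w ∈ s.filter (fun x => decide (x < -1)) := by rw [hf]; simp
    have hws : w ∈ s := (List.mem_filter.mp hwmem).1
    have := List.count_pos_iff.mpr hws
    push_cast
    omega

-- the sentinel window, stated over the sorted list, implies D_numPlayers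
lemma Wnd_to_D (scores : List Int) (k : Int)
    (hw : Wnd (PySem.List.sorted scores (fun x => x) true) k) : D_numPlayers scores k := by
  set s := PySem.List.sorted scores (fun x => x) true with hs
  have hperm : s.Perm scores := PySem.List.sorted_perm scores (fun x => x) true
  rcases hw with ⟨_, ⟨y, hy, hylt⟩, h3, h4⟩
  have h1k : 1 ≤ k := by
    have : (0 : Int) ≤ (mN s : Int) := by positivity
    omega
  refine ⟨h1k, ⟨y, hperm.mem_iff.mp hy, hylt⟩, ?_⟩
  have hik : ((k - 1).toNat : Int) = k - 1 := by omega
  have hic : (k - 1).toNat < s.countP (fun y => decide ((-1 : Int) ≤ y)) := by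
    rw [countP_ge_split s]
    unfold mN cN at h4 ⊢
    omega
  have hil : (k - 1).toNat < s.length :=
    lt_of_lt_of_le hic List.countP_le_length
  have him : s.countP (fun y => decide ((-1 : Int) < y)) ≤ (k - 1).toNat := by
    unfold mN at h3
    omega
  have hval : s[(k - 1).toNat] = -1 := by
    have hpws : s.Pairwise (fun a b => b ≤ a) := by
      have := PySem.List.sorted_pairwise_rev scores (fun x => x)
      simpa [← hs] using this
    exact sorted_getElem_m1 s hpws (k - 1).toNat hil him hic
  rw [← hs, PySem.List.pyGet?_of_nonneg s (by omega : (0 : Int) ≤ k - 1)]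
  rw [List.getElem?_eq_getElem hil, hval]

-- D_numPlayers implies the window correction is at least 1
lemma D_to_wfb (scores : List Int) (k : Int) (hD : D_numPlayers scores k) :
    1 ≤ wI (PySem.List.sorted scores (fun x => x) true) k
        * fbI (PySem.List.sorted scores (fun x => x) true) := by
  set s := PySem.List.sorted scores (fun x => x) true with hs
  have hperm : s.Perm scores := PySem.List.sorted_perm scores (fun x => x) true
  rcases hD with ⟨h1k, ⟨y, hy, hylt⟩, hget⟩
  rw [← hs] at hget
  rw [PySem.List.pyGet?_of_nonneg s (by omega : (0 : Int) ≤ k - 1)] at hget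
  rcases List.getElem?_eq_some_iff.mp hget with ⟨hil, hval⟩
  have hpws : s.Pairwise (fun a b => b ≤ a) := by
    have := PySem.List.sorted_pairwise_rev scores (fun x => x)
    simpa [← hs] using this
  have hinv := sorted_getElem_m1_inv s hpws (k - 1).toNat hil hval
  have hik : ((k - 1).toNat : Int) = k - 1 := by omega
  have hge := countP_ge_split s
  have hw1 : wI s k = 1 := by
    unfold wI
    rw [if_pos (by unfold mN cN at hge ⊢; omega)]
  have hfb : 1 ≤ fbI s := fbI_pos s y (hperm.mem_iff.mpr hy) hylt
  rw [hw1]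
  omega

-- ===== B side =====
lemma B_main (scores : List Int) (k : Int) :
    ∀ (vs : List Int) (t0 seen : Int),
    vs.Pairwise (fun a b => b ≤ a) → vs.Nodup →
    (∀ x ∈ scores, x ∈ vs ∨ ∀ u ∈ vs, u < x) →
    seen = (scores.countP (fun y => decide (y ∉ vs)) : Int) →
    (vs.foldl
      (fun (st : Int × Int) v =>
        (if st.2 + 1 ≤ k ∧ v ≠ 0 then st.1 + (List.count v scores : Int) else st.1,
         st.2 + (List.count v scores : Int))) (t0, seen)).1
      = t0 + (scores.countP (fun x => decide (x ∈ vs) && Pk scores k x) : Int) := by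
  intro vs
  induction vs with
  | nil =>
    intro t0 seen _ _ _ _
    simp [List.countP_eq_zero.mpr]
  | cons v vs ih =>
    intro t0 seen hpw hnd hcov hseen
    have hvnot : v ∉ vs := (List.nodup_cons.mp hnd).1
    have hle : ∀ u ∈ vs, u ≤ v := fun u hu => (List.pairwise_cons.mp hpw).1 u hu
    have hchar : ∀ x ∈ scores, (x ∉ (v :: vs)) ↔ v < x := by
      intro x hx
      constructor
      · intro hnot
        rcases hcov x hx with h | h
        · exact absurd h hnot
        · exact h v (by simp)
      · intro hlt hmem
        rcases List.mem_cons.mp hmem with rfl | hm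
        · exact lt_irrefl x hlt
        · exact absurd hlt (not_lt.mpr (hle x hm))
    have hseen' : seen = (scores.countP (fun y => decide (v < y)) : Int) := by
      rw [hseen]
      congr 1
      refine List.countP_congr (fun x hx => ?_)
      simpa using hchar x hx
    have hrk : rkI scores v = seen + 1 := by rw [hseen']; rfl
    have hcond : (seen + 1 ≤ k ∧ v ≠ 0) ↔ (rkI scores v ≤ k ∧ v ≠ 0) := by
      rw [hrk]
    have hseen2 : seen + (List.count v scores : Int)
        = (scores.countP (fun y => decide (y ∉ vs)) : Int) := by
      have hsv : scores.countP (fun y => decide (y ∉ vs))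
          = scores.countP (fun y => decide (y ∉ (v :: vs))) + scores.countP (fun y => y == v) := by
        refine countP_split _ _ _ _ (fun x hx => ?_)
        constructor
        · by_cases hxv : x = v
          · subst hxv; simp [hvnot]
          · simp [hxv, List.mem_cons]
        · rintro ⟨h1, h2⟩
          simp at h1 h2
          exact h1.1 h2
      rw [hsv, hseen]
      have : scores.countP (fun y => y == v) = List.count v scores := by
        simp [List.count_eq_countP]
      rw [this]; push_cast; ring
    have hcov' : ∀ x ∈ scores, x ∈ vs ∨ ∀ u ∈ vs, u < x := by
      intro x hx
      by_cases hxm : x ∈ vs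
      · exact Or.inl hxm
      · right
        intro u hu
        rcases hcov x hx with h | h
        · rcases List.mem_cons.mp h with rfl | hm
          · exact lt_of_le_of_ne (hle u hu) (fun he => hvnot (he ▸ hu))
          · exact absurd hm hxm
        · exact h u (by simp [hu])
    have hsplit2 : scores.countP (fun x => decide (x ∈ (v :: vs)) && Pk scores k x)
        = scores.countP (fun x => (x == v) && Pk scores k x)
          + scores.countP (fun x => decide (x ∈ vs) && Pk scores k x) := by
      refine countP_split _ _ _ _ (fun x hx => ?_)
      constructor
      · by_cases hxv : x = v
        · subst hxv; simp [hvnot]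
        · simp [hxv, List.mem_cons]
      · rintro ⟨h1, h2⟩
        simp at h1 h2
        exact absurd h2.1 (by simpa [h1.1] using hvnot)
    have hhead : scores.countP (fun x => (x == v) && Pk scores k x)
        = if rkI scores v ≤ k ∧ v ≠ 0 then List.count v scores else 0 := by
      by_cases hP : rkI scores v ≤ k ∧ v ≠ 0
      · rw [if_pos hP]
        rw [List.count_eq_countP]
        refine List.countP_congr (fun x _ => ?_)
        by_cases hxv : x = v
        · subst hxv; simp [Pk, hP]
        · simp [hxv]
      · rw [if_neg hP]
        refine List.countP_eq_zero.mpr (fun x hx => ?_)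
        by_cases hxv : x = v
        · subst hxv; simp [Pk, hP]
        · simp [hxv]
    simp only [List.foldl_cons]
    rw [ih (if seen + 1 ≤ k ∧ v ≠ 0 then t0 + (List.count v scores : Int) else t0)
        (seen + (List.count v scores : Int)) (List.pairwise_cons.mp hpw).2
        (List.nodup_cons.mp hnd).2 hcov' hseen2]
    rw [hsplit2, hhead]
    by_cases hP : rkI scores v ≤ k ∧ v ≠ 0
    · rw [if_pos (hcond.mpr hP), if_pos hP]; push_cast; ring
    · rw [if_neg (fun hc => hP (hcond.mp hc)), if_neg hP]; push_cast; ring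

lemma alt_eq_countP (scores : List Int) (k : Int) :
    numPlayers_alt scores k = (scores.countP (Pk scores k) : Int) := by
  unfold numPlayers_alt
  rw [show (scores.foldl (fun d x => d.insert x (d.getD x 0 + 1)) (PySem.Dict.empty : PySem.Dict Int Int)) = PySem.Dict.counter scores from PySem.Dict.foldl_insert_getD_add_one_eq_counter scores]
  simp only [PySem.Dict.getD_counter, PySem.Dict.keys_counter]
  have hperm := PySem.List.sorted_perm (PySem.Set.ofList scores) (fun v => v) true
  have hmem : ∀ x ∈ scores, x ∈ PySem.List.sorted (PySem.Set.ofList scores) (fun v => v) true := by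
    intro x hx
    rw [PySem.List.mem_sorted]
    exact (PySem.Set.mem_ofList scores x).mpr hx
  have hz : (0 : Int) = (scores.countP (fun y => decide (y ∉ PySem.List.sorted (PySem.Set.ofList scores) (fun v => v) true)) : Int) := by
    rw [List.countP_eq_zero.mpr (fun x hx => by simp [hmem x hx])]
    rfl
  rw [B_main scores k _ 0 0 (PySem.List.sorted_pairwise_rev _ _)
      (hperm.nodup_iff.mpr (PySem.Set.nodup_ofList scores))
      (fun x hx => Or.inl (hmem x hx)) hz]
  have hc : scores.countP (fun x => decide (x ∈ PySem.List.sorted (PySem.Set.ofList scores) (fun v => v) true) && Pk scores k x) = scores.countP (Pk scores k) :=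
    List.countP_congr (fun x hx => by simp [hmem x hx])
  rw [hc]
  ring

-- ===== VERDICT (by name: the statement is the Claim_ definition above) =====
theorem numPlayers_spec : Claim_unchanged_numPlayers := by
  intro scores k _ hND
  set s := PySem.List.sorted scores (fun x => x) true with hs
  have hperm : s.Perm scores := PySem.List.sorted_perm scores (fun x => x) true
  have hwfb : wI s k * fbI s = 0 := by
    by_contra hne
    apply hND
    apply Wnd_to_D
    rcases mul_ne_zero_iff.mp hne with ⟨hw, hf⟩
    have hwin : (mN s : Int) + 1 ≤ k ∧ k ≤ (mN s : Int) + (cN s : Int) := by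
      by_contra hcon
      exact hw (by unfold wI; rw [if_neg hcon])
    have hex : ∃ w ∈ s, w < -1 := by
      cases hfl : s.filter (fun x => decide (x < -1)) with
      | nil => exact absurd (by unfold fbI; rw [hfl]) hf
      | cons w l =>
        have hwmem : w ∈ s.filter (fun x => decide (x < -1)) := by rw [hfl]; simp
        exact ⟨w, (List.mem_filter.mp hwmem).1, by simpa using (List.mem_filter.mp hwmem).2⟩
    have hc1 : 0 < cN s := by omega
    exact ⟨List.count_pos_iff.mp (by unfold cN at hc1; exact hc1), hex, hwin⟩
  rw [A_exact scores k, alt_eq_countP scores k, ← hs]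
  have hPk : Pk s k = Pk scores k := by
    funext x
    unfold Pk rkI
    rw [hperm.countP_eq]
  rw [hPk, hperm.countP_eq, hwfb]
  ring

theorem numPlayers_tight : Claim_exact_numPlayers := by
  intro scores k _ hD
  have hwfb := D_to_wfb scores k hD
  have hA := A_exact scores k
  have hB := alt_eq_countP scores k
  have hperm : (PySem.List.sorted scores (fun x => x) true).Perm scores :=
    PySem.List.sorted_perm scores (fun x => x) true
  have hPk : Pk (PySem.List.sorted scores (fun x => x) true) k = Pk scores k := by
    funext x
    unfold Pk rkI
    rw [hperm.countP_eq]
  rw [hPk, hperm.countP_eq] at hA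
  omega

theorem numPlayers_changed : Claim_changed_numPlayers := by
  unfold Claim_changed_numPlayers; decide
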